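-- pv_equiv track=rewrite | github.com/Bennett5858/dr | gg/d.py.py | get_least_popular_digit_below_3
-- ===== SOURCE A (Python) =====
-- from collections import deque, Counter
--
-- def get_least_popular_digit_below_3(digits):
--     """
--     Dynamically finds the least frequent digit below 3 in the recent digit history.
--     If all digits below 3 are equally frequent, returns the one that appeared least recently.
--     If no digits below 3, returns 0 as a safe default.
--     """
--     if not digits:
--         return 0
--
--     # Only consider the most recent 100 digits for adaptiveness
--     recent_digits = list(digits)[-100:] if len(digits) > 100 else list(digits)
--     filtered = [d for d in recent_digits if d < 3]
--     if not filtered: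
--         return 0
--
--     counts = Counter(filtered)
--     min_count = min(counts.values())
--     least_popular = [d for d, c in counts.items() if c == min_count]
--
--     # If tie, pick the one that appeared least recently
--     for d in reversed(recent_digits):
--         if d in least_popular:
--             return d
--
--     return 0
-- ===== SOURCE B (Python) =====
-- def get_least_popular_digit_below_3(digits):
--     """Same result as A: least-frequent value < 3 in the last-100 window,
--     ties broken by most recent last occurrence; 0 if no value < 3."""
--     recent = list(digits)[-100:]
--     rev = recent[::-1]
--     candidates = {d for d in recent if d < 3}
--     if not candidates:
--         return 0
--     # rev.index(d) is injective on candidates, so this minimum is unique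
--     # (set iteration order cannot matter).
--     return min(candidates, key=lambda d: (recent.count(d), rev.index(d)))
-- ===== Notes on version B (the rewrite author's own statement) =====
-- stated objective: simpler
-- what changed: Replaces A's Counter, min over values, candidate-list build and separate reversed re-scan by deduplicating the below-3 values once and taking a single min() with the composite key (frequency, first index in the reversed window), which realises the same least-frequent/most-recently-seen selection in one expression.
import Mathlib
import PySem

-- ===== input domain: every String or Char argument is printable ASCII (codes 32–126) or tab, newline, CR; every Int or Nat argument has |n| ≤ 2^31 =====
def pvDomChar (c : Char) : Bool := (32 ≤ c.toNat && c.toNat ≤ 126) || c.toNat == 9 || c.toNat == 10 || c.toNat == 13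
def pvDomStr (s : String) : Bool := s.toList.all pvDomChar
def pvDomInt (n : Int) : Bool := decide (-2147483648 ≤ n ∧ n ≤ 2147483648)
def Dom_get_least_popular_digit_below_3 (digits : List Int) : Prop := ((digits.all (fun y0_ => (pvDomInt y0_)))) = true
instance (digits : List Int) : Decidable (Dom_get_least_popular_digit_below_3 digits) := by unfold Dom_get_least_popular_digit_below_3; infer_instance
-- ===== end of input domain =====

-- B replaces A's Counter / min-over-values / candidate-list build / reversed re-scan by a dedup of the
-- below-3 values and one min() with the composite key (frequency, first index in the reversed window):
-- objective 'simpler', same asymptotic cost.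

-- ===== PORT A =====
def get_least_popular_digit_below_3 (digits : List Int) : Int :=
  if digits = [] then 0
  else
    let recent_digits : List Int :=
      if PySem.List.len digits > 100 then PySem.List.slice digits (some (-100)) none else digits
    let filtered := recent_digits.filter (fun d => d < 3)
    if filtered = [] then 0
    else
      let counts := PySem.Dict.counter filtered
      -- min(counts.values()): counts is nonempty here, so Python's min returns (the 'none' arm is a totality guard)
      match PySem.List.min? (PySem.Dict.values counts) (fun v => v) with
      | none => 0
      | some min_count =>
        let least_popular := (counts.items.filter (fun p => p.2 == min_count)).map (·.1)
        -- for d in reversed(recent_digits): if d in least_popular: return d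
        match recent_digits.reverse.find? (fun d => least_popular.contains d) with
        | some d => d
        | none => 0

-- ===== PORT B =====
def get_least_popular_digit_below_3_alt (digits : List Int) : Int :=
  let recent := PySem.List.slice digits (some (-100)) none
  let rev := (PySem.List.slice? recent none none (-1)).getD []
  let candidates : PySem.Set Int := recent.foldl (fun s d => if d < 3 then PySem.Set.add s d else s) []
  if candidates = [] then 0
  else
    -- min(candidates, key=lambda d: (recent.count(d), rev.index(d))); every candidate occurs in rev,
    -- so rev.index never raises (the .getD 0 / 'none' arm are totality guards)
    match PySem.List.min2? candidates (fun d => PySem.List.count recent d)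
        (fun d => (PySem.List.index? rev d).getD 0) with
    | some d => d
    | none => 0

-- ===== PRECONDITION & SPEC =====
def Spec_get_least_popular_digit_below_3 (digits : List Int) (out : Int) : Prop := out = get_least_popular_digit_below_3_alt digits
instance (digits : List Int) (out : Int) : Decidable (Spec_get_least_popular_digit_below_3 digits out) := by unfold Spec_get_least_popular_digit_below_3; infer_instance

-- ===== CLAIM (what is proved, stated in full; the proofs are below) =====
def Claim_equal_get_least_popular_digit_below_3 : Prop := ∀ (digits : List Int), Dom_get_least_popular_digit_below_3 digits → Spec_get_least_popular_digit_below_3 digits (get_least_popular_digit_below_3 digits)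

-- ===== LEMMAS AND PROOFS =====

-- A's body after the input-empty test and the window step, as a function of the window r
def pvAbody (r : List Int) : Int :=
  let filtered := r.filter (fun d => d < 3)
  if filtered = [] then 0
  else
    let counts := PySem.Dict.counter filtered
    match PySem.List.min? (PySem.Dict.values counts) (fun v => v) with
    | none => 0
    | some min_count =>
      let least_popular := (counts.items.filter (fun p => p.2 == min_count)).map (·.1)
      match r.reverse.find? (fun d => least_popular.contains d) with
      | some d => d
      | none => 0

-- B's body as a function of the window r
def pvBbody (r : List Int) : Int :=
  let rev := r.reverse
  let candidates : PySem.Set Int := r.foldl (fun s d => if d < 3 then PySem.Set.add s d else s) []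
  if candidates = [] then 0
  else
    match PySem.List.min2? candidates (fun d => PySem.List.count r d)
        (fun d => (PySem.List.index? rev d).getD 0) with
    | some d => d
    | none => 0

lemma pv_window_eq (digits : List Int) :
    (if PySem.List.len digits > 100 then PySem.List.slice digits (some (-100)) none else digits)
      = PySem.List.slice digits (some (-100)) none := by
  rw [PySem.List.slice_from_neg_ofNat digits 100 (by norm_num)]
  split_ifs with h
  · rfl
  · have hl : digits.length ≤ 100 := by
      simp [PySem.List.len] at h; omega
    rw [Nat.sub_eq_zero_of_le hl, List.drop_zero]

lemma pv_A_eq_Abody (digits : List Int) :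
    get_least_popular_digit_below_3 digits = pvAbody (PySem.List.slice digits (some (-100)) none) := by
  by_cases h : digits = []
  · subst h; rfl
  · simp only [get_least_popular_digit_below_3, pvAbody, if_neg h, pv_window_eq]

lemma pv_B_eq_Bbody (digits : List Int) :
    get_least_popular_digit_below_3_alt digits = pvBbody (PySem.List.slice digits (some (-100)) none) := by
  simp only [get_least_popular_digit_below_3_alt, pvBbody, PySem.List.slice?_none_none_neg_one,
    Option.getD_some]

lemma pv_set_fold (r : List Int) : ∀ (s : PySem.Set Int),
    r.foldl (fun s d => if d < 3 then PySem.Set.add s d else s) s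
      = s.update (r.filter (fun d => d < 3)) := by
  induction r with
  | nil => intro s; simp [PySem.Set.update_nil]
  | cons x t ih =>
    intro s
    by_cases hx : x < 3
    · simp [List.foldl_cons, hx, ih, PySem.Set.update_cons]
    · simp [List.foldl_cons, hx, ih]

def pvStep (k1 k2 : Int → Nat) (acc : Option Int) (x : Int) : Option Int :=
  match acc with
  | none => some x
  | some m =>
    if (decide (k1 x < k1 m) || !decide (k1 m < k1 x) && decide (k2 x < k2 m)) = true then some x else some m

lemma pv_min2_eq (xs : List Int) (k1 k2 : Int → Nat) :
    PySem.List.min2? xs k1 k2 = List.foldl (pvStep k1 k2) none xs := by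
  unfold PySem.List.min2?
  congr 1
  funext acc x
  cases acc <;> rfl

lemma pv_min2_go (k1 k2 : Int → Nat) : ∀ (xs : List Int) (a : Int),
    ∃ m, List.foldl (pvStep k1 k2) (some a) xs = some m
      ∧ (m = a ∨ m ∈ xs)
      ∧ ∀ y, (y = a ∨ y ∈ xs) → k1 m < k1 y ∨ (k1 m = k1 y ∧ k2 m ≤ k2 y) := by
  intro xs
  induction xs with
  | nil =>
    intro a
    refine ⟨a, rfl, Or.inl rfl, ?_⟩
    rintro y (rfl | hy)
    · right; exact ⟨rfl, le_refl _⟩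
    · simp at hy
  | cons x t ih =>
    intro a
    by_cases hc : (decide (k1 x < k1 a) || !decide (k1 a < k1 x) && decide (k2 x < k2 a)) = true
    · obtain ⟨m, hfold, hmem, hmin⟩ := ih x
      have hstep : pvStep k1 k2 (some a) x = some x := by simp only [pvStep]; rw [if_pos hc]
      refine ⟨m, ?_, ?_, ?_⟩
      · rw [List.foldl_cons, hstep]; exact hfold
      · rcases hmem with rfl | hm
        · exact Or.inr List.mem_cons_self
        · exact Or.inr (List.mem_cons_of_mem _ hm)
      · rintro y (rfl | hy)
        · have hx := hmin x (Or.inl rfl)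
          simp only [Bool.or_eq_true, Bool.and_eq_true, Bool.not_eq_true', decide_eq_true_eq,
            decide_eq_false_iff_not] at hc
          omega
        · rcases List.mem_cons.mp hy with rfl | hy'
          · exact hmin y (Or.inl rfl)
          · exact hmin y (Or.inr hy')
    · obtain ⟨m, hfold, hmem, hmin⟩ := ih a
      have hstep : pvStep k1 k2 (some a) x = some a := by simp only [pvStep]; rw [if_neg hc]
      refine ⟨m, ?_, ?_, ?_⟩
      · rw [List.foldl_cons, hstep]; exact hfold
      · rcases hmem with rfl | hm
        · exact Or.inl rfl
        · exact Or.inr (List.mem_cons_of_mem _ hm)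
      · rintro y (rfl | hy)
        · exact hmin y (Or.inl rfl)
        · rcases List.mem_cons.mp hy with rfl | hy'
          · have ha := hmin a (Or.inl rfl)
            simp only [Bool.or_eq_true, Bool.and_eq_true, Bool.not_eq_true', decide_eq_true_eq,
              decide_eq_false_iff_not] at hc
            omega
          · exact hmin y (Or.inr hy')

lemma pv_min2_spec (xs : List Int) (k1 k2 : Int → Nat) (hne : xs ≠ []) :
    ∃ m, PySem.List.min2? xs k1 k2 = some m ∧ m ∈ xs
      ∧ ∀ y ∈ xs, k1 m < k1 y ∨ (k1 m = k1 y ∧ k2 m ≤ k2 y) := by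
  cases xs with
  | nil => exact absurd rfl hne
  | cons x t =>
    obtain ⟨m, hfold, hmem, hmin⟩ := pv_min2_go k1 k2 t x
    refine ⟨m, ?_, ?_, ?_⟩
    · rw [pv_min2_eq, List.foldl_cons]
      exact hfold
    · rcases hmem with rfl | hm
      · exact List.mem_cons_self
      · exact List.mem_cons_of_mem _ hm
    · intro y hy
      rcases List.mem_cons.mp hy with rfl | hy'
      · exact hmin y (Or.inl rfl)
      · exact hmin y (Or.inr hy')

lemma pv_index_self (as bs : List Int) (a : Int) (ha : a ∉ as) :
    PySem.List.index? (as ++ a :: bs) a = some as.length := by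
  rw [PySem.List.index?_eq_some_iff]
  exact ⟨as, bs, rfl, rfl, ha⟩

lemma pv_index_gt (as bs : List Int) (a y : Int) (hyas : y ∉ as) (hya : y ≠ a)
    (j : Nat) (hj : PySem.List.index? (as ++ a :: bs) y = some j) : as.length < j := by
  obtain ⟨hk, hgy, -⟩ := PySem.List.getElem_of_index?_eq_some hj
  by_contra hle
  rw [not_lt] at hle
  rcases lt_or_eq_of_le hle with hlt | heq
  · apply hyas
    have : (as ++ a :: bs)[j] = as[j] := List.getElem_append_left hlt
    rw [this] at hgy
    exact hgy ▸ List.getElem_mem _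
  · apply hya
    subst heq
    have h2 : (as ++ a :: bs)[as.length]'hk = (a :: bs)[as.length - as.length]'(by simp) :=
      List.getElem_append_right (le_refl _)
    rw [h2] at hgy
    simpa using hgy.symm

lemma pv_core (r : List Int) : pvAbody r = pvBbody r := by
  unfold pvAbody pvBbody
  have hfold : r.foldl (fun s d => if d < 3 then PySem.Set.add s d else s) []
      = PySem.Set.ofList (r.filter (fun d => d < 3)) := by
    rw [pv_set_fold]
    exact PySem.Set.update_empty _
  rw [hfold]
  set f := r.filter (fun d => d < 3) with hf
  set S := PySem.Set.ofList f with hSdef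
  by_cases hfe : f = []
  · have : S = [] := by rw [hSdef, hfe]; rfl
    simp [hfe, this]
  · obtain ⟨x, hx⟩ := List.exists_mem_of_ne_nil f hfe
    have hS : S ≠ [] := fun h => by
      have : x ∈ S := (PySem.Set.mem_ofList f x).mpr hx
      simp [h] at this
    rw [if_neg hfe, if_neg hS]
    dsimp only
    -- values of the counter
    have hvals : PySem.Dict.values (PySem.Dict.counter f)
        = S.map (fun k => ((List.count k f : Int))) := by
      simp only [PySem.Dict.values, PySem.Dict.items_counter, List.map_map]
      rfl
    rw [hvals]
    have hmapne : S.map (fun k => ((List.count k f : Int))) ≠ [] := by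
      simpa using hS
    cases hmc : PySem.List.min? (S.map (fun k => ((List.count k f : Int)))) (fun v => v) with
    | none => exact absurd ((PySem.List.min?_eq_none_iff _ _).mp hmc) hmapne
    | some mc =>
    -- mc is attained and minimal
    obtain ⟨k0, hk0S, hk0⟩ := List.mem_map.mp (PySem.List.min?_mem hmc)
    have hmcmin : ∀ k ∈ S, mc ≤ (List.count k f : Int) := by
      intro k hk
      exact PySem.List.min?_isMin hmc _ (List.mem_map.mpr ⟨k, hk, rfl⟩)
    -- membership in least_popular
    have hlp : ∀ d : Int,
        (d ∈ ((PySem.Dict.counter f).items.filter (fun p => p.2 == mc)).map (fun x => x.1))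
          ↔ (d ∈ S ∧ (List.count d f : Int) = mc) := by
      intro d
      rw [PySem.Dict.items_counter]
      simp only [List.filter_map, List.map_map, List.mem_map, List.mem_filter, Function.comp]
      constructor
      · rintro ⟨k, ⟨hkS, hkc⟩, rfl⟩
        exact ⟨hkS, by simpa using hkc⟩
      · rintro ⟨hdS, hdc⟩
        exact ⟨d, ⟨hdS, by simpa using hdc⟩, rfl⟩
    -- the reversed scan succeeds
    have hk0f : k0 ∈ f := (PySem.Set.mem_ofList f k0).mp hk0S
    have hmemr : ∀ d ∈ f, d ∈ r := fun d hd => (List.mem_filter.mp hd).1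
    have hlt3 : ∀ d ∈ f, d < 3 := fun d hd => by
      have := (List.mem_filter.mp hd).2; simpa using this
    cases hfind : List.find? (fun d =>
        (((PySem.Dict.counter f).items.filter (fun p => p.2 == mc)).map (fun x => x.1)).contains d)
        r.reverse with
    | none =>
      exfalso
      have hk0lp := (hlp k0).mpr ⟨hk0S, hk0⟩
      exact (List.find?_eq_none.mp hfind k0 (List.mem_reverse.mpr (hmemr k0 hk0f)))
        (by simpa [List.contains_iff_mem] using hk0lp)
    | some a =>
    obtain ⟨hqa, as, bs, hrev, hnas⟩ := List.find?_eq_some_iff_append.mp hfind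
    have halp : a ∈ S ∧ (List.count a f : Int) = mc := (hlp a).mp
      (by simpa [List.contains_iff_mem] using hqa)
    -- B's minimiser
    obtain ⟨b, hbeq, hbS, hbmin⟩ := pv_min2_spec S (fun d => PySem.List.count r d)
      (fun d => (PySem.List.index? r.reverse d).getD 0) hS
    rw [hbeq]
    -- counts agree on S
    have hcnt : ∀ d ∈ S, PySem.List.count r d = List.count d f := by
      intro d hd
      rw [PySem.List.count_eq]
      exact (List.count_filter (by simpa using hlt3 d ((PySem.Set.mem_ofList f d).mp hd))).symm
    have hba := hbmin a halp.1
    rw [hcnt b hbS, hcnt a halp.1] at hba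
    have h1 := hmcmin b hbS
    have h2 := halp.2
    dsimp only
    rw [hfind]
    show a = b
    rcases hba with h | ⟨hk1eq, hk2⟩
    · exfalso; omega
    have hcb : (List.count b f : Int) = mc := by omega
    by_cases hab : b = a
    · exact hab.symm
    exfalso
    -- b is a candidate occurring in the reversed window
    have hqb : (((PySem.Dict.counter f).items.filter (fun p => p.2 == mc)).map (fun x => x.1)).contains b = true := by
      simpa [List.contains_iff_mem] using (hlp b).mpr ⟨hbS, hcb⟩
    have hbrev : b ∈ r.reverse := List.mem_reverse.mpr (hmemr b ((PySem.Set.mem_ofList f b).mp hbS))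
    have hbnotas : b ∉ as := by
      intro hmem
      have := hnas b hmem
      rw [hqb] at this
      simp at this
    have hbbs : b ∈ bs := by
      rw [hrev] at hbrev
      rcases List.mem_append.mp hbrev with h' | h'
      · exact absurd h' hbnotas
      · rcases List.mem_cons.mp h' with h'' | h''
        · exact absurd h'' hab
        · exact h''
    have hanotas : a ∉ as := by
      intro hmem
      have := hnas a hmem
      rw [hqa] at this
      simp at this
    -- indices in the reversed window
    have hidxa : PySem.List.index? r.reverse a = some as.length := by
      rw [hrev]; exact pv_index_self as bs a hanotas
    obtain ⟨j, hj⟩ := Option.isSome_iff_exists.mp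
      ((PySem.List.index?_isSome_iff r.reverse b).mpr hbrev)
    have hjgt : as.length < j := by
      apply pv_index_gt as bs a b hbnotas hab j
      rw [← hrev]; exact hj
    rw [hidxa, hj] at hk2
    simp only [Option.getD_some] at hk2
    omega

-- ===== VERDICT (by name: the statement is the Claim_ definition above) =====
theorem get_least_popular_digit_below_3_spec : Claim_equal_get_least_popular_digit_below_3 := by
  intro digits _
  unfold Spec_get_least_popular_digit_below_3
  rw [pv_A_eq_Abody, pv_B_eq_Bbody, pv_core]
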